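-- pv_equiv track=rewrite | github.com/gr0mph/SpringChallenge2020 | SpringChallenge2020.py | iterate2
-- ===== SOURCE A (Python) =====
-- import sys, copy, heapq
--
-- def iterate2( prev_output , prev_input , prev_id ):
--     next_input = []
--     next_id = False
--     for i1,d1 in prev_input :
--         if i1 != prev_id and next_id == False : next_id = i1
--         if next_id != False :                   next_input.append( (i1,d1) )
--
--     if next_id == False:
--         return prev_output
--
--     next_output = [ ]
--     while prev_output :
--         curr_output = prev_output.pop(0)
--
--         for i1, d1 in next_input :
--             if i1 == next_id :
--                 o1 = copy.copy(curr_output)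
--                 o1.append(d1)
--                 next_output.append(o1)
--
--     return iterate2( next_output , next_input , next_id )
-- ===== SOURCE B (Python) =====
-- def iterate2(prev_output, prev_input, prev_id):
--     # Iterative version: directly locate the start of the next id-block
--     # (first entry whose id differs from prev_id and is nonzero, matching
--     # A's `== False` test on ids), slice, and extend every combination with
--     # the matching data values by a comprehension.  Unlike A it does not
--     # drain the caller's prev_output list in place.
--     while True:
--         k = next((j for j, (i, _) in enumerate(prev_input)
--                   if i != prev_id and i != 0), None)
--         if k is None:
--             return prev_output
--         next_input = prev_input[k:]
--         next_id = next_input[0][0]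
--         prev_output = [o + [d] for o in prev_output
--                        for i, d in next_input if i == next_id]
--         prev_input, prev_id = next_input, next_id
-- ===== Notes on version B (the rewrite author's own statement) =====
-- stated objective: simpler
-- what changed: Replaces tail recursion with an iterative loop, replaces the stateful two-flag forward scan by a direct search for the first entry whose id differs from prev_id and is nonzero (the meaning of A's '== False' tests) followed by a slice, and builds each generation with a list comprehension instead of draining prev_output with pop(0); B does not mutate the caller's prev_output.
import Mathlib
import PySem

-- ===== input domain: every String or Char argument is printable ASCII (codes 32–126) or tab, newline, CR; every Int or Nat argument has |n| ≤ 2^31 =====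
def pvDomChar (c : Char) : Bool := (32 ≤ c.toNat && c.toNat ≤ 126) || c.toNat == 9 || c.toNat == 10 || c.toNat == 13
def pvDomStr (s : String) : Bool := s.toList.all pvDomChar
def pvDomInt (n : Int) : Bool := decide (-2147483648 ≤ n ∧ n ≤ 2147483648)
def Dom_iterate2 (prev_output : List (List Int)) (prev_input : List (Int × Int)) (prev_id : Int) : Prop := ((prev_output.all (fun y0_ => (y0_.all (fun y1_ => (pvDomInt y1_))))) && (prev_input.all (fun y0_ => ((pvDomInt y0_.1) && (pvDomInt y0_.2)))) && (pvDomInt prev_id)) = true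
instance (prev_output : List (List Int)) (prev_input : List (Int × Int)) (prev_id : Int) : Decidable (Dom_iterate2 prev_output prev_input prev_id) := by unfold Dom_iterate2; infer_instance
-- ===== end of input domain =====

-- B replaces A's tail recursion + stateful flag scan + pop(0) draining by an iterative
-- loop with a direct first-index search, a slice and a comprehension (objective: simpler).
-- Equivalence is about the RETURN value: A drains the caller's prev_output via pop(0), B does not mutate it.

-- ===== PORT A =====
-- A's forward scan: state (next_input, next_id); Python's `next_id == False` is `next_id = 0`
-- (ids are ints; 0 == False in Python), `next_id = False` initialisation is the 0 state.
def iterate2ScanStep (prev_id : Int) (st : List (Int × Int) × Int) (p : Int × Int) : List (Int × Int) × Int :=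
  let nid := if p.1 ≠ prev_id ∧ st.2 = 0 then p.1 else st.2
  let ni := if nid ≠ 0 then st.1 ++ [p] else st.1
  (ni, nid)

-- fuel: A's recursion always terminates (each recursive call after the first strictly
-- shortens prev_input), made structural with fuel = prev_input.length + 2, which is
-- provably never exhausted on the recursion's actual trace (guard only, same computation).
def iterate2A : Nat → List (List Int) → List (Int × Int) → Int → List (List Int)
  | 0, prev_output, _, _ => prev_output
  | fuel+1, prev_output, prev_input, prev_id =>
    let st := prev_input.foldl (iterate2ScanStep prev_id) ([], 0)
    let next_input := st.1
    let next_id := st.2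
    if next_id = 0 then prev_output
    else
      -- while prev_output: pop(0); for (i1,d1) in next_input: if i1 == next_id: append
      let next_output := prev_output.foldl (fun acc curr =>
        next_input.foldl (fun acc2 p =>
          if p.1 = next_id then acc2 ++ [curr ++ [p.2]] else acc2) acc) []
      iterate2A fuel next_output next_input next_id

def iterate2 (prev_output : List (List Int)) (prev_input : List (Int × Int)) (prev_id : Int) : List (List Int) :=
  iterate2A (prev_input.length + 2) prev_output prev_input prev_id

-- ===== PORT B =====
-- Source B's `while True:` loop as a fuel-indexed tail recursion (guard only, same computation).
def iterate2B : Nat → List (List Int) → List (Int × Int) → Int → List (List Int)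
  | 0, prev_output, _, _ => prev_output
  | fuel+1, prev_output, prev_input, prev_id =>
    match prev_input.findIdx? (fun p => p.1 != prev_id && p.1 != 0) with
    | none => prev_output
    | some k =>
      let next_input := prev_input.drop k
      let next_id := (next_input.headD (0, 0)).1
      let next_output := prev_output.flatMap (fun o =>
        (next_input.filter (fun p => p.1 == next_id)).map (fun p => o ++ [p.2]))
      iterate2B fuel next_output next_input next_id

def iterate2_alt (prev_output : List (List Int)) (prev_input : List (Int × Int)) (prev_id : Int) : List (List Int) :=
  iterate2B (prev_input.length + 2) prev_output prev_input prev_id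

-- ===== PRECONDITION & SPEC =====
def Spec_iterate2 (prev_output : List (List Int)) (prev_input : List (Int × Int)) (prev_id : Int) (out : List (List Int)) : Prop := out = iterate2_alt prev_output prev_input prev_id
instance (prev_output : List (List Int)) (prev_input : List (Int × Int)) (prev_id : Int) (out : List (List Int)) : Decidable (Spec_iterate2 prev_output prev_input prev_id out) := by unfold Spec_iterate2; infer_instance

-- ===== CLAIM (what is proved, stated in full; the proofs are below) =====
def Claim_equal_iterate2 : Prop := ∀ (prev_output : List (List Int)) (prev_input : List (Int × Int)) (prev_id : Int), Dom_iterate2 prev_output prev_input prev_id → Spec_iterate2 prev_output prev_input prev_id (iterate2 prev_output prev_input prev_id)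

-- ===== LEMMAS AND PROOFS =====

-- once next_id is nonzero, A's scan just appends every remaining element
theorem scan_after (prev_id v : Int) (hv : v ≠ 0) (l acc : List (Int × Int)) :
    l.foldl (iterate2ScanStep prev_id) (acc, v) = (acc ++ l, v) := by
  induction l generalizing acc with
  | nil => simp
  | cons p t ih =>
      have hstep : iterate2ScanStep prev_id (acc, v) p = (acc ++ [p], v) := by
        simp [iterate2ScanStep, hv]
      rw [List.foldl_cons, hstep, ih]; simp

-- A's scan: if no entry has id ≠ prev_id and id ≠ 0, the state stays ([], 0)
theorem scan_none (prev_id : Int) (l : List (Int × Int))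
    (h : l.findIdx? (fun p => p.1 != prev_id && p.1 != 0) = none) :
    l.foldl (iterate2ScanStep prev_id) ([], 0) = ([], 0) := by
  induction l with
  | nil => simp
  | cons p t ih =>
      rw [List.findIdx?_cons] at h
      by_cases hp : (p.1 != prev_id && p.1 != 0) = true
      · simp [hp] at h
      · have hstep : iterate2ScanStep prev_id ([], (0 : Int)) p = ([], 0) := by
          simp only [bne, Bool.and_eq_true, Bool.not_eq_true', beq_eq_false_iff_ne,
            not_and_or, not_not] at hp
          rcases hp with hp | hp <;> simp [iterate2ScanStep, hp]
        rw [List.foldl_cons, hstep]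
        simp only [hp] at h
        exact ih (by simpa using h)

-- A's scan: at the first index k whose id differs from prev_id and is nonzero, the scan
-- locks next_id to that id and collects exactly the suffix from k on
theorem scan_some (prev_id : Int) (l : List (Int × Int)) (k : Nat)
    (h : l.findIdx? (fun p => p.1 != prev_id && p.1 != 0) = some k) :
    l.foldl (iterate2ScanStep prev_id) ([], 0)
        = (l.drop k, ((l.drop k).headD (0, 0)).1)
      ∧ ((l.drop k).headD (0, 0)).1 ≠ 0 := by
  induction l generalizing k with
  | nil => simp at h
  | cons p t ih =>
      rw [List.findIdx?_cons] at h
      by_cases hp : (p.1 != prev_id && p.1 != 0) = true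
      · simp only [hp, if_true, Option.some.injEq] at h
        subst h
        have hne : p.1 ≠ prev_id ∧ p.1 ≠ 0 := by simpa [bne] using hp
        refine ⟨?_, by simpa using hne.2⟩
        have hstep : iterate2ScanStep prev_id ([], (0 : Int)) p = ([p], p.1) := by
          simp [iterate2ScanStep, hne.1, hne.2]
        rw [List.foldl_cons, hstep, scan_after prev_id p.1 hne.2]
        simp
      · simp only [hp] at h
        obtain ⟨k', hk', rfl⟩ : ∃ k', t.findIdx? (fun p => p.1 != prev_id && p.1 != 0) = some k' ∧ k = k' + 1 := by
          cases hfi : t.findIdx? (fun p => p.1 != prev_id && p.1 != 0) with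
          | none => rw [hfi] at h; simp at h
          | some k' => rw [hfi] at h; simp at h; exact ⟨k', rfl, h.symm⟩
        have hstep : iterate2ScanStep prev_id ([], (0 : Int)) p = ([], 0) := by
          simp only [bne, Bool.and_eq_true, Bool.not_eq_true', beq_eq_false_iff_ne,
            not_and_or, not_not] at hp
          rcases hp with hp | hp <;> simp [iterate2ScanStep, hp]
        rw [List.foldl_cons, hstep, List.drop_succ_cons]
        exact ih k' hk'

-- one generation: A's drain-and-append double loop equals B's comprehension
theorem step_eq (po : List (List Int)) (ni : List (Int × Int)) (nid : Int) :
    po.foldl (fun acc curr =>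
        ni.foldl (fun acc2 p =>
          if p.1 = nid then acc2 ++ [curr ++ [p.2]] else acc2) acc) []
      = po.flatMap (fun o => (ni.filter (fun p => p.1 == nid)).map (fun p => o ++ [p.2])) := by
  have hinner : ∀ (curr : List Int) (acc : List (List Int)),
      ni.foldl (fun acc2 p => if p.1 = nid then acc2 ++ [curr ++ [p.2]] else acc2) acc
        = acc ++ (ni.filter (fun p => p.1 == nid)).map (fun p => curr ++ [p.2]) := by
    intro curr acc
    rw [PySem.List.foldl_append_ite (fun p => p.1 = nid) (fun p => curr ++ [p.2]) ni acc]
    have : (fun x : Int × Int => decide (x.1 = nid)) = (fun p : Int × Int => p.1 == nid) := by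
      funext p; by_cases h : p.1 = nid <;> simp [h]
    rw [this]
  suffices hgen : ∀ acc : List (List Int),
      po.foldl (fun acc curr =>
        ni.foldl (fun acc2 p =>
          if p.1 = nid then acc2 ++ [curr ++ [p.2]] else acc2) acc) acc
      = acc ++ po.flatMap (fun o => (ni.filter (fun p => p.1 == nid)).map (fun p => o ++ [p.2])) by
    simpa using hgen []
  induction po with
  | nil => simp
  | cons o t ih =>
      intro acc
      rw [List.foldl_cons, hinner o acc, ih]
      simp

-- the two loops agree at every fuel value
theorem fuel_eq : ∀ (fuel : Nat) (po : List (List Int)) (pi : List (Int × Int)) (pid : Int),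
    iterate2A fuel po pi pid = iterate2B fuel po pi pid := by
  intro fuel
  induction fuel with
  | zero => intro po pi pid; rfl
  | succ n ih =>
      intro po pi pid
      cases hfi : pi.findIdx? (fun p => p.1 != pid && p.1 != 0) with
      | none =>
          have hs := scan_none pid pi hfi
          simp [iterate2A, iterate2B, hs, hfi]
      | some k =>
          obtain ⟨hs, hnz⟩ := scan_some pid pi k hfi
          simp only [iterate2A, iterate2B, hs, hfi, if_neg hnz, step_eq]
          exact ih _ _ _

-- ===== VERDICT (by name: the statement is the Claim_ definition above) =====
theorem iterate2_spec : Claim_equal_iterate2 := by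
  intro po pi pid _
  show iterate2 po pi pid = iterate2_alt po pi pid
  unfold iterate2 iterate2_alt
  exact fuel_eq _ _ _ _
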